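-- pv_equiv track=rewrite | github.com/jiva-z/Programmers | 프로그래머스/0/181884. n보다 커질 때까지 더하기/n보다 커질 때까지 더하기.py | solution
-- ===== SOURCE A (Python) =====
-- def solution(numbers, n):
--     answer = 0
--     for number in numbers:
--         if answer > n:
--             return answer
--         else:
--             answer += number
--
--     return answer
-- ===== SOURCE B (Python) =====
-- def solution(numbers, n):
--     # build the full prefix-sum table [0, p1, ..., pk] first, then scan it
--     totals = [0]
--     for x in numbers:
--         totals.append(totals[-1] + x)
--     # A tests the running sum only BEFORE each addition, so the final prefix
--     # is never tested, only returned as fallback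
--     for t in totals[:-1]:
--         if t > n:
--             return t
--     return totals[-1]
-- ===== Notes on version B (the rewrite author's own statement) =====
-- stated objective: alternative
-- what changed: B materialises the full prefix-sum table [0,p1,...,pk] in one pass and then separately scans all but the last entry for the first value exceeding n, falling back to the last entry, instead of A's single loop that interleaves the test with the accumulation and early-returns.
import Mathlib
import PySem

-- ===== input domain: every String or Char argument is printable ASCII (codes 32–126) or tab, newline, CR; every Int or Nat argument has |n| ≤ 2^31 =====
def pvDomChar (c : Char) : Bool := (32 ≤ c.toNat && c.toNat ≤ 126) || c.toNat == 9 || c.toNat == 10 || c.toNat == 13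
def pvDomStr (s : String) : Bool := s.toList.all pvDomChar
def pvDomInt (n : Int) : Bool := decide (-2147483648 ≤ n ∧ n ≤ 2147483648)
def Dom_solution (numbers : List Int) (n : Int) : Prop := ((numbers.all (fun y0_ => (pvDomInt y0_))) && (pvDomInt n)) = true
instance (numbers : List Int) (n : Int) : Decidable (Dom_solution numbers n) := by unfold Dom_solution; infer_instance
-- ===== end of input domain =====

-- B builds the full prefix-sum table and then scans it separately, instead of A's
-- single loop interleaving test and accumulation (objective: alternative decomposition).

-- ===== PORT A =====
-- the for-loop with early return, as structural recursion on numbers carrying 'answer'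
def solGo (n : Int) (answer : Int) : List Int → Int
  | [] => answer
  | number :: rest => if answer > n then answer else solGo n (answer + number) rest

def solution (numbers : List Int) (n : Int) : Int := solGo n 0 numbers

-- ===== PORT B =====
-- first loop of Source B: totals = [0]; for x in numbers: totals.append(totals[-1] + x)
def buildTotals (numbers : List Int) : List Int :=
  numbers.foldl (fun ts x => ts ++ [ts.getLastD 0 + x]) [0]

-- second loop: first t in totals[:-1] with t > n, else totals[-1]
def solution_alt (numbers : List Int) (n : Int) : Int :=
  let totals := buildTotals numbers
  match totals.dropLast.find? (fun t => t > n) with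
  | some t => t
  | none => totals.getLastD 0

-- ===== PRECONDITION & SPEC =====
def Spec_solution (numbers : List Int) (n : Int) (out : Int) : Prop := out = solution_alt numbers n
instance (numbers : List Int) (n : Int) (out : Int) : Decidable (Spec_solution numbers n out) := by unfold Spec_solution; infer_instance

-- ===== CLAIM (what is proved, stated in full; the proofs are below) =====
def Claim_equal_solution : Prop := ∀ (numbers : List Int) (n : Int), Dom_solution numbers n → Spec_solution numbers n (solution numbers n)

-- ===== LEMMAS AND PROOFS =====

-- mathematical prefix-sum list [a, a+x1, a+x1+x2, ...]
def scanAdd (a : Int) : List Int → List Int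
  | [] => [a]
  | x :: xs => a :: scanAdd (a + x) xs

theorem scanAdd_ne_nil (a : Int) (l : List Int) : scanAdd a l ≠ [] := by
  cases l <;> simp [scanAdd]

theorem dropLast_append_getLastD (ts : List Int) (h : ts ≠ []) :
    ts.dropLast ++ [ts.getLastD 0] = ts := by
  induction ts with
  | nil => simp at h
  | cons x xs ih =>
      cases xs with
      | nil => simp
      | cons y ys =>
          rw [List.dropLast_cons_of_ne_nil (by simp), List.getLastD_cons]
          have := ih (by simp)
          rw [List.getLastD_cons] at this ⊢
          rw [List.getLastD_eq_getLast?] at this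
          simp [this]

theorem buildTotals_aux (l : List Int) (ts : List Int) (hts : ts ≠ []) :
    l.foldl (fun ts x => ts ++ [ts.getLastD 0 + x]) ts
      = ts.dropLast ++ scanAdd (ts.getLastD 0) l := by
  induction l generalizing ts with
  | nil =>
      rw [List.foldl_nil]
      show ts = ts.dropLast ++ [ts.getLastD 0]
      exact (dropLast_append_getLastD ts hts).symm
  | cons x xs ih =>
      rw [List.foldl_cons, ih _ (by simp)]
      rw [List.dropLast_concat, List.getLastD_concat]
      show ts ++ scanAdd (ts.getLastD 0 + x) xs
            = ts.dropLast ++ (ts.getLastD 0 :: scanAdd (ts.getLastD 0 + x) xs)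
      rw [show ts.getLastD 0 :: scanAdd (ts.getLastD 0 + x) xs
            = [ts.getLastD 0] ++ scanAdd (ts.getLastD 0 + x) xs from rfl,
          ← List.append_assoc, dropLast_append_getLastD ts hts]

theorem buildTotals_eq (numbers : List Int) : buildTotals numbers = scanAdd 0 numbers := by
  have := buildTotals_aux numbers [0] (by simp)
  simpa [buildTotals] using this

theorem solGo_eq (n : Int) (l : List Int) (a : Int) :
    solGo n a l
      = match (scanAdd a l).dropLast.find? (fun t => t > n) with
        | some t => t
        | none => (scanAdd a l).getLastD 0 := by
  induction l generalizing a with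
  | nil => simp [solGo, scanAdd]
  | cons x xs ih =>
      have hne := scanAdd_ne_nil (a + x) xs
      simp only [solGo, scanAdd]
      rw [List.dropLast_cons_of_ne_nil hne, List.find?_cons]
      by_cases h : a > n
      · simp [h]
      · rw [if_neg h]
        have hdec : (decide (a > n)) = false := by simpa using h
        rw [hdec]
        show solGo n (a + x) xs
              = match List.find? (fun t => decide (t > n)) (scanAdd (a + x) xs).dropLast with
                | some t => t
                | none => (a :: scanAdd (a + x) xs).getLastD 0
        rw [ih]
        cases xs with
        | nil => simp [scanAdd]
        | cons y ys => rfl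

-- ===== VERDICT =====
theorem solution_spec : Claim_equal_solution := by
  intro numbers n _
  unfold Spec_solution solution solution_alt
  rw [buildTotals_eq, solGo_eq]
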